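-- pv_equiv track=rewrite | github.com/GjorgiNechovski/advent-of-code-2024 | Day12_Python/main.py | calculateSides
-- ===== SOURCE A (Python) =====
-- from collections import deque
--
-- DIRECTIONS = [(-1, 0), (0, 1), (1, 0), (0, -1)]
--
-- def calculateSides(directionInfo):
--     sides = 0
--     for direction, positions in directionInfo.items():
--         visitedPerimeter = set()
--         for (currRow, currCol) in positions:
--             if (currRow, currCol) not in visitedPerimeter:
--                 sides += 1
--                 queue = deque([(currRow, currCol)])
--                 while queue:
--                     row2, col2 = queue.popleft()
--                     if (row2, col2) in visitedPerimeter: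
--                         continue
--                     visitedPerimeter.add((row2, col2))
--                     for dirX, dirY in DIRECTIONS:
--                         newRow, newCol = row2 + dirX, col2 + dirY
--                         if (newRow, newCol) in positions:
--                             queue.append((newRow, newCol))
--     return sides
-- ===== SOURCE B (Python) =====
-- DIRECTIONS = [(-1, 0), (0, 1), (1, 0), (0, -1)]
--
-- def calculateSides(directionInfo):
--     # Round-based set-saturation flood fill instead of a BFS queue:
--     # grow each component by repeated sweeps until a fixed point.
--     sides = 0
--     for positions in directionInfo.values():
--         visited = set()
--         for p in positions:
--             if p in visited:
--                 continue
--             sides += 1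
--             comp = {p}
--             changed = True
--             while changed:
--                 changed = False
--                 for q in positions:
--                     if q not in comp and any((q[0] + dx, q[1] + dy) in comp for dx, dy in DIRECTIONS):
--                         comp.add(q)
--                         changed = True
--             visited |= comp
--     return sides
-- ===== Notes on version B (the rewrite author's own statement) =====
-- stated objective: alternative
-- what changed: Replaces the per-start BFS with a deque by a round-based set-saturation flood fill: each component is grown by repeated full sweeps over the positions until a fixed point, so no queue is maintained.
import Mathlib
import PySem

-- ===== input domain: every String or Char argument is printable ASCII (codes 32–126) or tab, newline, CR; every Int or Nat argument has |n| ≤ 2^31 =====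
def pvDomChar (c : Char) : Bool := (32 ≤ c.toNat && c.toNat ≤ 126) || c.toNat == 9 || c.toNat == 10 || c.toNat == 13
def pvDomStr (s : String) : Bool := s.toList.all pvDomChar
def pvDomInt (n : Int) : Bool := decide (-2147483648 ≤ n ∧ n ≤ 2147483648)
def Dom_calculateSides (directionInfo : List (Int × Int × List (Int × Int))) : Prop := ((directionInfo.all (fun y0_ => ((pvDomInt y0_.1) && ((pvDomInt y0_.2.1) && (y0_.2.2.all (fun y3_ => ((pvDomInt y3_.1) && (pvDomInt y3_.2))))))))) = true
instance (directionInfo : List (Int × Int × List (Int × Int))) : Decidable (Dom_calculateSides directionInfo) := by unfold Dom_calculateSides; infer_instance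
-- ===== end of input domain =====

-- B replaces A's queue-based BFS flood fill by a round-based set-saturation flood fill
-- (repeated sweeps over the positions to a fixed point); same return value ('alternative').
-- The dict argument arrives as its items list (distinct keys); both Pythons only iterate the
-- items/values in order, so both ports iterate the list directly.

-- ===== PORT A =====
def pvDirs : List (Int × Int) := [(-1, 0), (0, 1), (1, 0), (0, -1)]

def pvNbrs (x : Int × Int) : List (Int × Int) := pvDirs.map (fun d => (x.1 + d.1, x.2 + d.2))

-- A's 'while queue' BFS loop; fuel-guarded (fuel 1 + 5*|positions| is proved sufficient below)
def pvBfs (P : List (Int × Int)) : Nat → List (Int × Int) → PySem.Set (Int × Int) → PySem.Set (Int × Int)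
  | 0, _, V => V
  | _ + 1, [], V => V
  | f + 1, x :: q, V =>
    if x ∈ V then pvBfs P f q V
    else pvBfs P f (q ++ (pvNbrs x).filter (fun y => decide (y ∈ P))) (PySem.Set.add V x)

-- body of A's 'for (currRow, currCol) in positions', carrying (sides, visitedPerimeter)
def pvInnerA (positions : List (Int × Int)) (st : Int × PySem.Set (Int × Int)) (p : Int × Int) :
    Int × PySem.Set (Int × Int) :=
  if p ∈ st.2 then st
  else (st.1 + 1, pvBfs positions (1 + 5 * positions.length) [p] st.2)

def calculateSides (directionInfo : List (Int × Int × List (Int × Int))) : Int :=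
  directionInfo.foldl
    (fun sides t => (t.2.2.foldl (pvInnerA t.2.2) (sides, PySem.Set.empty)).1) 0

-- ===== PORT B =====
-- one step of B's sweep 'for q in positions: …', carrying (comp, changed)
def pvSweepStep (st : PySem.Set (Int × Int) × Bool) (q : Int × Int) :
    PySem.Set (Int × Int) × Bool :=
  if q ∈ st.1 then st
  else if pvDirs.any (fun d => decide ((q.1 + d.1, q.2 + d.2) ∈ st.1)) then
    (PySem.Set.add st.1 q, true)
  else st

-- one full sweep of B's saturation loop
def pvPass (P : List (Int × Int)) (C : PySem.Set (Int × Int)) :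
    PySem.Set (Int × Int) × Bool :=
  P.foldl pvSweepStep (C, false)

-- B's 'while changed' loop; fuel-guarded (fuel |positions| + 1 is proved sufficient below)
def pvSat (P : List (Int × Int)) : Nat → PySem.Set (Int × Int) → PySem.Set (Int × Int)
  | 0, C => C
  | f + 1, C =>
    let r := pvPass P C
    if r.2 then pvSat P f r.1 else r.1

-- body of B's 'for p in positions', carrying (sides, visited)
def pvInnerB (positions : List (Int × Int)) (st : Int × PySem.Set (Int × Int)) (p : Int × Int) :
    Int × PySem.Set (Int × Int) :=
  if p ∈ st.2 then st
  else (st.1 + 1,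
    PySem.Set.union st.2
      (pvSat positions (positions.length + 1) (PySem.Set.add PySem.Set.empty p)))

def calculateSides_alt (directionInfo : List (Int × Int × List (Int × Int))) : Int :=
  directionInfo.foldl
    (fun sides t => (t.2.2.foldl (pvInnerB t.2.2) (sides, PySem.Set.empty)).1) 0

-- ===== PRECONDITION & SPEC =====
def Spec_calculateSides (directionInfo : List (Int × Int × List (Int × Int))) (out : Int) : Prop := out = calculateSides_alt directionInfo
instance (directionInfo : List (Int × Int × List (Int × Int))) (out : Int) : Decidable (Spec_calculateSides directionInfo out) := by unfold Spec_calculateSides; infer_instance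

-- ===== CLAIM (what is proved, stated in full; the proofs are below) =====
def Claim_equal_calculateSides : Prop := ∀ (directionInfo : List (Int × Int × List (Int × Int))), Dom_calculateSides directionInfo → Spec_calculateSides directionInfo (calculateSides directionInfo)

-- ===== LEMMAS AND PROOFS =====

-- grid adjacency restricted to the position set P
def pvStep (P : List (Int × Int)) (a b : Int × Int) : Prop := b ∈ pvNbrs a ∧ b ∈ P

def pvReach (P : List (Int × Int)) (a b : Int × Int) : Prop :=
  Relation.ReflTransGen (pvStep P) a b

-- adjacency whose target avoids a visited set V
def pvRel (P : List (Int × Int)) (V : List (Int × Int)) (a b : Int × Int) : Prop :=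
  pvStep P a b ∧ b ∉ V

def pvClosed (P : List (Int × Int)) (V : List (Int × Int)) : Prop :=
  ∀ a ∈ V, ∀ b, pvStep P a b → b ∈ V

-- number of distinct positions not yet in V
def pvUnv (P V : List (Int × Int)) : Nat :=
  ((PySem.List.dedup P).filter (fun x => decide (x ∉ V))).length

theorem pvNbrs_symm (a b : Int × Int) : a ∈ pvNbrs b ↔ b ∈ pvNbrs a := by
  simp [pvNbrs, pvDirs, Prod.ext_iff]
  constructor <;> (rintro (⟨h1, h2⟩ | ⟨h1, h2⟩ | ⟨h1, h2⟩ | ⟨h1, h2⟩) <;> omega)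

theorem pvUnv_lt (P C C' : List (Int × Int)) (hsub : ∀ z ∈ C, z ∈ C')
    (q : Int × Int) (hqP : q ∈ P) (hq1 : q ∉ C) (hq2 : q ∈ C') :
    pvUnv P C' < pvUnv P C := by
  unfold pvUnv
  have hsl : List.Sublist ((PySem.List.dedup P).filter (fun x => decide (x ∉ C')))
      ((PySem.List.dedup P).filter (fun x => decide (x ∉ C))) := by
    apply List.monotone_filter_right
    intro a ha
    simp only [decide_eq_true_eq] at *
    exact fun hc => ha (hsub a hc)
  have hq : q ∈ (PySem.List.dedup P).filter (fun x => decide (x ∉ C)) := by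
    simp [hqP, hq1]
  have hq' : q ∉ (PySem.List.dedup P).filter (fun x => decide (x ∉ C')) := by
    simp [hq2]
  refine Nat.lt_of_le_of_ne hsl.length_le (fun heq => hq' ?_)
  rw [hsl.eq_of_length heq]
  exact hq

theorem pvUnv_le (P V : List (Int × Int)) : pvUnv P V ≤ P.length := by
  calc ((PySem.List.dedup P).filter _).length ≤ (PySem.List.dedup P).length :=
        List.length_filter_le _ _
    _ ≤ P.length := by simpa using PySem.Set.length_ofList_le (xs := P)

theorem pvRel_mono (P V V' : List (Int × Int)) (hVV : ∀ z ∈ V, z ∈ V')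
    (a b : Int × Int) (h : pvRel P V' a b) : pvRel P V a b :=
  ⟨h.1, fun hb => h.2 (hVV _ hb)⟩

-- a path avoiding V either avoids x as well, or its suffix after the last x avoids V ∪ {x}
theorem pvPath_split (P : List (Int × Int)) (V : List (Int × Int)) (x : Int × Int)
    (w y : Int × Int) (h : Relation.ReflTransGen (pvRel P V) w y) :
    y = x ∨ Relation.ReflTransGen (pvRel P (PySem.Set.add V x)) w y ∨
      ∃ z, pvStep P x z ∧ z ∉ PySem.Set.add V x ∧
        Relation.ReflTransGen (pvRel P (PySem.Set.add V x)) z y := by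
  induction h with
  | refl =>
    by_cases hwx : w = x
    · exact Or.inl hwx
    · exact Or.inr (Or.inl Relation.ReflTransGen.refl)
  | @tail b y hb hby ih =>
    by_cases hyx : y = x
    · exact Or.inl hyx
    · have hy' : y ∉ PySem.Set.add V x := by
        simp [PySem.Set.mem_add, hby.2, hyx]
      rcases ih with hbx | hmid | ⟨z, hz1, hz2, hz3⟩
      · subst hbx
        exact Or.inr (Or.inr ⟨y, hby.1, hy', Relation.ReflTransGen.refl⟩)
      · exact Or.inr (Or.inl (hmid.tail ⟨hby.1, hy'⟩))
      · exact Or.inr (Or.inr ⟨z, hz1, hz2, hz3.tail ⟨hby.1, hy'⟩⟩)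

-- characterisation of A's BFS loop: visited gains exactly the V-avoiding reachable positions
theorem pvBfs_mem (P : List (Int × Int)) :
    ∀ (f : Nat) (q V : List (Int × Int)), (∀ w ∈ q, w ∈ P) →
      q.length + 5 * pvUnv P V ≤ f →
      ∀ x, x ∈ pvBfs P f q V ↔
        x ∈ V ∨ ∃ w ∈ q, w ∉ V ∧ Relation.ReflTransGen (pvRel P V) w x := by
  intro f
  induction f with
  | zero =>
    intro q V hq hb x
    have hq0 : q = [] := List.eq_nil_of_length_eq_zero (by omega)
    subst hq0
    simp [pvBfs]
  | succ f ih =>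
    intro q V hq hb x
    match q with
    | [] => simp [pvBfs]
    | x' :: q =>
      have hx'P : x' ∈ P := hq x' List.mem_cons_self
      by_cases hx' : x' ∈ V
      · rw [show pvBfs P (f + 1) (x' :: q) V = pvBfs P f q V by simp [pvBfs, hx']]
        rw [ih q V (fun w hw => hq w (List.mem_cons_of_mem _ hw)) (by simp at hb ⊢; omega) x]
        constructor
        · rintro (h | ⟨w, hw, hwV, hp⟩)
          · exact Or.inl h
          · exact Or.inr ⟨w, List.mem_cons_of_mem _ hw, hwV, hp⟩
        · rintro (h | ⟨w, hw, hwV, hp⟩)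
          · exact Or.inl h
          · rcases List.mem_cons.mp hw with rfl | hw
            · exact absurd hx' hwV
            · exact Or.inr ⟨w, hw, hwV, hp⟩
      · have hunfold : pvBfs P (f + 1) (x' :: q) V =
            pvBfs P f (q ++ (pvNbrs x').filter (fun y => decide (y ∈ P))) (PySem.Set.add V x') := by
          simp [pvBfs, hx']
        rw [hunfold]
        have hlen4 : (pvNbrs x').length = 4 := by simp [pvNbrs, pvDirs]
        have hu : pvUnv P (PySem.Set.add V x') < pvUnv P V :=
          pvUnv_lt P V (PySem.Set.add V x')
            (fun z hz => (PySem.Set.mem_add _ _ _).mpr (Or.inl hz)) x' hx'P hx'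
            ((PySem.Set.mem_add _ _ _).mpr (Or.inr rfl))
        have hq' : ∀ w ∈ q ++ (pvNbrs x').filter (fun y => decide (y ∈ P)), w ∈ P := by
          intro w hw
          rcases List.mem_append.mp hw with hw | hw
          · exact hq w (List.mem_cons_of_mem _ hw)
          · simpa using (List.mem_filter.mp hw).2
        have hb' : (q ++ (pvNbrs x').filter (fun y => decide (y ∈ P))).length +
            5 * pvUnv P (PySem.Set.add V x') ≤ f := by
          have hfl : ((pvNbrs x').filter (fun y => decide (y ∈ P))).length ≤ 4 := by
            rw [← hlen4]; exact List.length_filter_le _ _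
          simp only [List.length_append] at *
          simp at hb
          omega
        rw [ih _ _ hq' hb' x]
        constructor
        · rintro (hxv | ⟨w, hwq, hwV', hp⟩)
          · rcases (PySem.Set.mem_add _ _ _).mp hxv with h | rfl
            · exact Or.inl h
            · exact Or.inr ⟨x, List.mem_cons_self, hx', Relation.ReflTransGen.refl⟩
          · have hwV : w ∉ V := fun h => hwV' ((PySem.Set.mem_add _ _ _).mpr (Or.inl h))
            have hpV : Relation.ReflTransGen (pvRel P V) w x :=
              Relation.ReflTransGen.mono
                (fun a b h => pvRel_mono P V (PySem.Set.add V x')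
                  (fun z hz => (PySem.Set.mem_add _ _ _).mpr (Or.inl hz)) a b h) hp
            rcases List.mem_append.mp hwq with hw | hw
            · exact Or.inr ⟨w, List.mem_cons_of_mem _ hw, hwV, hpV⟩
            · have := List.mem_filter.mp hw
              exact Or.inr ⟨x', List.mem_cons_self, hx',
                Relation.ReflTransGen.head ⟨⟨this.1, by simpa using this.2⟩, hwV⟩ hpV⟩
        · rintro (hxV | ⟨w, hw, hwV, hp⟩)
          · exact Or.inl ((PySem.Set.mem_add _ _ _).mpr (Or.inl hxV))
          · rcases pvPath_split P V x' w x hp with rfl | hmid | ⟨z, hz1, hz2, hz3⟩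
            · exact Or.inl ((PySem.Set.mem_add _ _ _).mpr (Or.inr rfl))
            · by_cases hwx : w = x'
              · subst hwx
                rcases Relation.ReflTransGen.cases_head hmid with rfl | ⟨z, hz1, hz2⟩
                · exact Or.inl ((PySem.Set.mem_add _ _ _).mpr (Or.inr rfl))
                · refine Or.inr ⟨z, List.mem_append_right _ ?_, hz1.2, hz2⟩
                  exact List.mem_filter.mpr ⟨hz1.1.1, by simpa using hz1.1.2⟩
              · have hwq : w ∈ q := by
                  rcases List.mem_cons.mp hw with rfl | h
                  · exact absurd rfl hwx
                  · exact h
                refine Or.inr ⟨w, List.mem_append_left _ hwq, ?_, hmid⟩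
                simp [PySem.Set.mem_add, hwV, hwx]
            · refine Or.inr ⟨z, List.mem_append_right _ ?_, hz2, hz3⟩
              exact List.mem_filter.mpr ⟨hz1.1, by simpa using hz1.2⟩

theorem pvPath_end_not_mem (P V : List (Int × Int)) (w y : Int × Int)
    (h : Relation.ReflTransGen (pvRel P V) w y) (hw : w ∉ V) : y ∉ V := by
  induction h with
  | refl => exact hw
  | tail _ h2 _ => exact h2.2

theorem pvReach_end_mem (P : List (Int × Int)) (w y : Int × Int)
    (h : pvReach P w y) : y = w ∨ y ∈ P := by
  induction h with
  | refl => exact Or.inl rfl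
  | tail _ h2 _ => exact Or.inr h2.2

-- when V is closed under adjacency, avoiding V from an unvisited start is plain reachability
theorem pvReach_avoid_iff (P V : List (Int × Int)) (hcl : pvClosed P V)
    (w : Int × Int) (hw : w ∉ V) (hwP : w ∈ P) (x : Int × Int) :
    Relation.ReflTransGen (pvRel P V) w x ↔ pvReach P w x := by
  constructor
  · exact fun h => Relation.ReflTransGen.mono (fun a b hab => hab.1) h
  · intro h
    induction h with
    | refl => exact Relation.ReflTransGen.refl
    | @tail b y hb hby ih =>
      have hbP : b ∈ P := by
        rcases pvReach_end_mem P w b hb with rfl | h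
        · exact hwP
        · exact h
      have hbV : b ∉ V := pvPath_end_not_mem P V w b ih hw
      have hyV : y ∉ V := by
        intro hyV
        exact hbV (hcl y hyV b ⟨(pvNbrs_symm b y).mpr hby.1, hbP⟩)
      exact ih.tail ⟨hby, hyV⟩

-- B's sweep: comp only grows
theorem pvSweep_subset :
    ∀ (l : List (Int × Int)) (st : PySem.Set (Int × Int) × Bool),
      ∀ z ∈ st.1, z ∈ (l.foldl pvSweepStep st).1 := by
  intro l
  induction l with
  | nil => intro st z hz; exact hz
  | cons q l ih =>
    intro st z hz
    simp only [List.foldl_cons]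
    apply ih
    unfold pvSweepStep
    split
    · exact hz
    · split
      · exact (PySem.Set.mem_add _ _ _).mpr (Or.inl hz)
      · exact hz

theorem pvSweep_flag_mono :
    ∀ (l : List (Int × Int)) (st : PySem.Set (Int × Int) × Bool), st.2 = true →
      (l.foldl pvSweepStep st).2 = true := by
  intro l
  induction l with
  | nil => intro st h; exact h
  | cons q l ih =>
    intro st h
    simp only [List.foldl_cons]
    apply ih
    unfold pvSweepStep
    split
    · exact h
    · split
      · rfl
      · exact h

-- a sweep that reports no change left comp untouched, and comp is saturated
theorem pvSweep_false_no_add :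
    ∀ (l : List (Int × Int)) (C : PySem.Set (Int × Int)),
      (l.foldl pvSweepStep (C, false)).2 = false →
      (l.foldl pvSweepStep (C, false)).1 = C ∧
        ∀ q ∈ l, q ∈ C ∨ ∀ d ∈ pvDirs, (q.1 + d.1, q.2 + d.2) ∉ C := by
  intro l
  induction l with
  | nil => intro C _; exact ⟨rfl, by simp⟩
  | cons q l ih =>
    intro C hfalse
    simp only [List.foldl_cons] at hfalse ⊢
    by_cases hq : q ∈ C
    · rw [show pvSweepStep (C, false) q = (C, false) by simp [pvSweepStep, hq]] at hfalse ⊢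
      obtain ⟨h1, h2⟩ := ih C hfalse
      exact ⟨h1, fun q' hq' => by
        rcases List.mem_cons.mp hq' with rfl | h
        · exact Or.inl hq
        · exact h2 q' h⟩
    · by_cases hany : pvDirs.any (fun d => decide ((q.1 + d.1, q.2 + d.2) ∈ C)) = true
      · rw [show pvSweepStep (C, false) q = (PySem.Set.add C q, true) by
          simp [pvSweepStep, hq, hany]] at hfalse
        rw [pvSweep_flag_mono l _ rfl] at hfalse
        exact absurd hfalse (by simp)
      · rw [show pvSweepStep (C, false) q = (C, false) by
          simp only [pvSweepStep, if_neg hq, if_neg hany]] at hfalse ⊢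
        obtain ⟨h1, h2⟩ := ih C hfalse
        refine ⟨h1, fun q' hq' => ?_⟩
        rcases List.mem_cons.mp hq' with rfl | h
        · refine Or.inr (fun d hd hmem => ?_)
          exact absurd (List.any_eq_true.mpr ⟨d, hd, by simpa using hmem⟩) hany
        · exact h2 q' h

-- a sweep that reports a change added some new position from the scanned list
theorem pvSweep_true_new :
    ∀ (l : List (Int × Int)) (st : PySem.Set (Int × Int) × Bool),
      (l.foldl pvSweepStep st).2 = true → st.2 = true ∨
        ∃ q ∈ l, q ∉ st.1 ∧ q ∈ (l.foldl pvSweepStep st).1 := by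
  intro l
  induction l with
  | nil => intro st h; exact Or.inl h
  | cons q l ih =>
    intro st h
    simp only [List.foldl_cons] at h ⊢
    by_cases hq : q ∈ st.1
    · rw [show pvSweepStep st q = st by simp [pvSweepStep, hq]] at h ⊢
      rcases ih st h with h1 | ⟨q', hq', h2, h3⟩
      · exact Or.inl h1
      · exact Or.inr ⟨q', List.mem_cons_of_mem _ hq', h2, h3⟩
    · by_cases hany : pvDirs.any (fun d => decide ((q.1 + d.1, q.2 + d.2) ∈ st.1)) = true
      · rw [show pvSweepStep st q = (PySem.Set.add st.1 q, true) by
          simp [pvSweepStep, hq, hany]] at h ⊢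
        refine Or.inr ⟨q, List.mem_cons_self, hq, ?_⟩
        exact pvSweep_subset l _ q ((PySem.Set.mem_add _ _ _).mpr (Or.inr rfl))
      · rw [show pvSweepStep st q = st by
          simp only [pvSweepStep, if_neg hq, if_neg hany]] at h ⊢
        rcases ih st h with h1 | ⟨q', hq', h2, h3⟩
        · exact Or.inl h1
        · exact Or.inr ⟨q', List.mem_cons_of_mem _ hq', h2, h3⟩

-- every element a sweep adds is reachable from p
theorem pvSweep_sound (P : List (Int × Int)) (p : Int × Int) :
    ∀ (l : List (Int × Int)) (st : PySem.Set (Int × Int) × Bool),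
      (∀ q ∈ l, q ∈ P) → (∀ z ∈ st.1, pvReach P p z) →
      ∀ z ∈ (l.foldl pvSweepStep st).1, pvReach P p z := by
  intro l
  induction l with
  | nil => intro st _ hst z hz; exact hst z hz
  | cons q l ih =>
    intro st hl hst
    simp only [List.foldl_cons]
    apply ih _ (fun q' h => hl q' (List.mem_cons_of_mem _ h))
    intro z hz
    unfold pvSweepStep at hz
    split at hz
    · exact hst z hz
    · split at hz
      · rcases (PySem.Set.mem_add _ _ _).mp hz with h | rfl
        · exact hst z h
        · rename_i hany
          obtain ⟨d, hd, hmem⟩ := List.any_eq_true.mp hany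
          simp only [decide_eq_true_eq] at hmem
          refine (hst _ hmem).tail ?_
          refine ⟨?_, hl z List.mem_cons_self⟩
          have : (z.1 + d.1, z.2 + d.2) ∈ pvNbrs z := List.mem_map.mpr ⟨d, hd, rfl⟩
          exact (pvNbrs_symm _ _).mp this
      · exact hst z hz

-- characterisation of B's saturation loop: it computes the component of p
theorem pvSat_mem (P : List (Int × Int)) (p : Int × Int) :
    ∀ (f : Nat) (C : PySem.Set (Int × Int)), p ∈ C →
      (∀ z ∈ C, pvReach P p z) → pvUnv P C + 1 ≤ f →
      ∀ x, x ∈ pvSat P f C ↔ pvReach P p x := by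
  intro f
  induction f with
  | zero => intro C _ _ hb; omega
  | succ f ih =>
    intro C hpC hC hb x
    by_cases hflag : (pvPass P C).2 = true
    · rw [show pvSat P (f + 1) C = pvSat P f (pvPass P C).1 by
        simp only [pvSat]; rw [if_pos hflag]]
      have hnew := pvSweep_true_new P (C, false) hflag
      simp only at hnew
      rcases hnew with h | ⟨q, hqP, hq1, hq2⟩
      · exact absurd h (by simp)
      · have hlt : pvUnv P (pvPass P C).1 < pvUnv P C :=
          pvUnv_lt P C (pvPass P C).1 (pvSweep_subset P (C, false)) q hqP hq1 hq2
        exact ih (pvPass P C).1 (pvSweep_subset P (C, false) p hpC)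
          (pvSweep_sound P p P (C, false) (fun q h => h) hC) (by omega) x
    · rw [show pvSat P (f + 1) C = (pvPass P C).1 by
        simp only [pvSat]; rw [if_neg hflag]]
      obtain ⟨heq, hcl⟩ := pvSweep_false_no_add P C (by simpa using hflag)
      unfold pvPass
      rw [heq]
      constructor
      · exact hC x
      · intro hreach
        induction hreach with
        | refl => exact hpC
        | @tail b y hb' hby ihr =>
          have hbC : b ∈ C := ihr
          rcases hcl y hby.2 with h | h
          · exact h
          · exfalso
            have : b ∈ pvNbrs y := (pvNbrs_symm _ _).mpr hby.1
            simp only [pvNbrs, List.mem_map] at this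
            obtain ⟨d, hd, hbd⟩ := this
            exact h d hd (hbd ▸ hbC)

-- the two inner folds produce the same count from membership-equal, adjacency-closed visited sets
theorem pvInner_eq (P : List (Int × Int)) :
    ∀ (l : List (Int × Int)) (s : Int) (VA VB : PySem.Set (Int × Int)),
      (∀ w ∈ l, w ∈ P) → (∀ x, x ∈ VA ↔ x ∈ VB) → pvClosed P VA →
      (l.foldl (pvInnerA P) (s, VA)).1 = (l.foldl (pvInnerB P) (s, VB)).1 := by
  intro l
  induction l with
  | nil => intro s VA VB _ _ _; rfl
  | cons p l ih =>
    intro s VA VB hl hiff hcl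
    have hpP : p ∈ P := hl p List.mem_cons_self
    simp only [List.foldl_cons]
    by_cases hpA : p ∈ VA
    · have hpB : p ∈ VB := (hiff p).mp hpA
      rw [show pvInnerA P (s, VA) p = (s, VA) by simp [pvInnerA, hpA],
          show pvInnerB P (s, VB) p = (s, VB) by simp [pvInnerB, hpB]]
      exact ih s VA VB (fun w h => hl w (List.mem_cons_of_mem _ h)) hiff hcl
    · have hpB : p ∉ VB := fun h => hpA ((hiff p).mpr h)
      rw [show pvInnerA P (s, VA) p =
            (s + 1, pvBfs P (1 + 5 * P.length) [p] VA) by simp [pvInnerA, hpA],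
          show pvInnerB P (s, VB) p =
            (s + 1, PySem.Set.union VB
              (pvSat P (P.length + 1) (PySem.Set.add PySem.Set.empty p))) by
            simp [pvInnerB, hpB]]
      have hA : ∀ x, x ∈ pvBfs P (1 + 5 * P.length) [p] VA ↔ x ∈ VA ∨ pvReach P p x := by
        intro x
        rw [pvBfs_mem P (1 + 5 * P.length) [p] VA
          (by intro w hw; rcases List.mem_cons.mp hw with rfl | h; exact hpP; cases h)
          (by have := pvUnv_le P VA; simp; omega) x]
        constructor
        · rintro (h | ⟨w, hw, hwV, hp'⟩)
          · exact Or.inl h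
          · rcases List.mem_cons.mp hw with rfl | h
            · exact Or.inr ((pvReach_avoid_iff P VA hcl w hwV hpP x).mp hp')
            · cases h
        · rintro (h | h)
          · exact Or.inl h
          · exact Or.inr ⟨p, List.mem_cons_self, hpA,
              (pvReach_avoid_iff P VA hcl p hpA hpP x).mpr h⟩
      have hB : ∀ x, x ∈ PySem.Set.union VB
          (pvSat P (P.length + 1) (PySem.Set.add PySem.Set.empty p)) ↔
          x ∈ VB ∨ pvReach P p x := by
        intro x
        rw [PySem.Set.mem_union]
        have hsat := pvSat_mem P p (P.length + 1) (PySem.Set.add PySem.Set.empty p)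
          ((PySem.Set.mem_add _ _ _).mpr (Or.inr rfl))
          (by
            intro z hz
            rcases (PySem.Set.mem_add _ _ _).mp hz with h | rfl
            · cases h
            · exact Relation.ReflTransGen.refl)
          (by have := pvUnv_le P (PySem.Set.add PySem.Set.empty p); omega) x
        rw [hsat]
      have hiff' : ∀ x, x ∈ pvBfs P (1 + 5 * P.length) [p] VA ↔
          x ∈ PySem.Set.union VB (pvSat P (P.length + 1) (PySem.Set.add PySem.Set.empty p)) := by
        intro x; rw [hA, hB, hiff]
      have hcl' : pvClosed P (pvBfs P (1 + 5 * P.length) [p] VA) := by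
        intro a ha b hstep
        rw [hA] at ha
        rw [hA]
        rcases ha with h | h
        · exact Or.inl (hcl a h b hstep)
        · exact Or.inr (h.tail hstep)
      exact ih (s + 1) _ _ (fun w h => hl w (List.mem_cons_of_mem _ h)) hiff' hcl'

theorem pvOuter_eq : ∀ (di : List (Int × Int × List (Int × Int))) (s : Int),
    di.foldl (fun sides t => (t.2.2.foldl (pvInnerA t.2.2) (sides, PySem.Set.empty)).1) s =
    di.foldl (fun sides t => (t.2.2.foldl (pvInnerB t.2.2) (sides, PySem.Set.empty)).1) s := by
  intro di
  induction di with
  | nil => intro s; rfl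
  | cons t rest ih =>
    intro s
    simp only [List.foldl_cons]
    rw [pvInner_eq t.2.2 t.2.2 s PySem.Set.empty PySem.Set.empty (fun w h => h)
      (fun x => Iff.rfl) (fun a ha => absurd ha (by simp [PySem.Set.empty]))]
    exact ih _

-- ===== VERDICT (by name: the statement is the Claim_ definition above) =====
theorem calculateSides_spec : Claim_equal_calculateSides := by
  intro di _
  unfold Spec_calculateSides calculateSides calculateSides_alt
  exact pvOuter_eq di 0
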